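-- pv_equiv track=rewrite | github.com/FoodieFridays/partitions-test | partitionFunctions.py | partition_from_maya
-- ===== SOURCE A (Python) =====
-- def partition_from_maya(maya_set, charge):
--     # Various sets defined in Nathan's paper
--     s_plus = []
--     s_minus = []
--
--     # A "helper" set
--     s_minus_adjust = []
--
--     # Final output
--     partition = []
--
--     # Adjust for a charge, if needed
--     if charge != 0:
--         for i in range(len(maya_set)):
--             maya_set[i] -= charge
--
--     # Numbers to go into s_plus
--     for i in range(len(maya_set)):
--         if maya_set[i] != 0:
--             s_plus.append(maya_set[i])
--         else:
--             break
--
--     # Adjusting numbers from s_plus to go into the partition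
--     for i in range(len(s_plus)):
--         partition.append(s_plus[i] + i)
--
--     # Numbers to go into s_minus
--     for i in range(-1, min(maya_set) - 1, -1):
--         if i not in maya_set:
--             s_minus.append(i)
--
--     # Numbers to go into the s_minus adjusted set
--     for num in s_minus:
--         s_minus_adjust.append(-1 * num)
--
--     for i in range(len(s_minus_adjust)):
--         s_minus_adjust[i] -= i
--
--     # Based on s_minus_adjusted, we compute the additional numbers that must be added to the partition
--     for i in range(1, max(s_minus_adjust) + 1):
--         count = sum(num >= i for num in s_minus_adjust)
--         partition.append(count)
--
--     return partition
-- ===== SOURCE B (Python) =====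
-- def partition_from_maya(maya_set, charge):
--     # One pass per phase: set membership, frequency dict + suffix counts instead of
--     # A's per-value rescans.  Return value only: A also mutates maya_set in place
--     # when charge != 0; B does not.
--     adj = [x - charge for x in maya_set]
--
--     partition = []
--     k = 0
--     for x in adj:
--         if x == 0:
--             break
--         partition.append(x + k)
--         k += 1
--
--     present = set(adj)
--     m = min(adj)
--
--     s_minus_adjust = []
--     k = 0
--     for i in range(-1, m - 1, -1):
--         if i not in present:
--             s_minus_adjust.append(-i - k)
--             k += 1
--
--     M = max(s_minus_adjust)
--     freq = {}
--     for v in s_minus_adjust: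
--         freq[v] = freq.get(v, 0) + 1
--
--     tail = []
--     cnt = 0
--     for i in range(M, 0, -1):
--         cnt += freq.get(i, 0)
--         tail.append(cnt)
--     partition.extend(reversed(tail))
--     return partition
-- ===== Notes on version B (the rewrite author's own statement) =====
-- stated objective: faster
-- what changed: B replaces A's per-candidate list scans (membership test over the whole list for every negative candidate, and a full re-scan of s_minus_adjust for every value 1..max) with one set for membership and a frequency dict whose suffix counts are accumulated in a single descending pass.
import Mathlib
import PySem

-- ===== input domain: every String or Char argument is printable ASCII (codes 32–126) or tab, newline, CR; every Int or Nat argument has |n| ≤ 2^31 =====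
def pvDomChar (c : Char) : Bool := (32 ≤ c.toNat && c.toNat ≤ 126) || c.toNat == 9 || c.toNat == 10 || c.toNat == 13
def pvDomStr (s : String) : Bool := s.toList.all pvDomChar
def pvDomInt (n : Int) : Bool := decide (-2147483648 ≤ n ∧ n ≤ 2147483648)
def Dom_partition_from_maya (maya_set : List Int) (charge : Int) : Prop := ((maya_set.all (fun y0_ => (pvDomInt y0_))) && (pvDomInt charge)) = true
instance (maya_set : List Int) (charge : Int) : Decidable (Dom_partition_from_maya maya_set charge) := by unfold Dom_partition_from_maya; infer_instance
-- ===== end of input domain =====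

-- B replaces A's per-candidate and per-value rescans with a set, a frequency dict and one
-- descending suffix-count pass (faster); equivalence is about the RETURN value only:
-- Python A also mutates maya_set in place when charge ≠ 0, B does not.

-- ===== PORT A =====
def partition_from_maya (maya_set : List Int) (charge : Int) : List Int :=
  let maya := if charge ≠ 0 then maya_set.map (fun x => x - charge) else maya_set
  let s_plus := maya.takeWhile (fun x => x != 0)
  let partition := (s_plus.zipIdx.map (fun p => p.1 + (p.2 : Int)))
  match PySem.List.min? maya (fun x => x) with
  | none => partition  -- Python: min([]) raises ValueError here (excluded by Pre_)
  | some mn =>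
    let s_minus := (PySem.List.pyRange (-1) (mn - 1) (-1)).filter (fun i => decide (i ∉ maya))
    let s_minus_adjust := s_minus.map (fun num => -1 * num)
    let s_minus_adjust2 := s_minus_adjust.zipIdx.map (fun p => p.1 - (p.2 : Int))
    match PySem.List.max? s_minus_adjust2 (fun x => x) with
    | none => partition  -- Python: max([]) raises ValueError here (excluded by Pre_)
    | some mx =>
      partition ++ (PySem.List.pyRange 1 (mx + 1) 1).map
        (fun i => s_minus_adjust2.foldl (fun acc num => if i ≤ num then acc + 1 else acc) (0 : Int))

-- ===== PORT B =====
-- B's prefix loop (append x+k until a zero is met)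
def pvBPlus : List Int → Int → List Int
  | [], _ => []
  | x :: t, k => if x = 0 then [] else (x + k) :: pvBPlus t (k + 1)

def partition_from_maya_alt (maya_set : List Int) (charge : Int) : List Int :=
  let adj := maya_set.map (fun x => x - charge)
  let partition := pvBPlus adj 0
  let present := PySem.Set.ofList adj
  match PySem.List.min? adj (fun x => x) with
  | none => partition  -- Python: min([]) raises ValueError here (excluded by Pre_)
  | some m =>
    -- gap loop: for each candidate not in `present`, append -i - k and bump k
    let gaps := (PySem.List.pyRange (-1) (m - 1) (-1)).foldl
      (fun (st : Int × List Int) i => if i ∈ present then st else (st.1 + 1, (-i - st.1) :: st.2))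
      ((0 : Int), ([] : List Int))
    let sma := gaps.2.reverse
    match PySem.List.max? sma (fun x => x) with
    | none => partition  -- Python: max([]) raises ValueError here (excluded by Pre_)
    | some mx =>
      let freq := sma.foldl (fun d v => d.insert v (d.getD v 0 + 1)) (PySem.Dict.empty : PySem.Dict Int Int)
      let st := (PySem.List.pyRange mx 0 (-1)).foldl
        (fun (st : Int × List Int) i => let c := st.1 + freq.getD i 0; (c, st.2 ++ [c])) ((0:Int), ([] : List Int))
      partition ++ st.2.reverse

-- ===== PRECONDITION & SPEC =====
-- Pre_ excludes exactly the inputs where Python A raises ValueError (min/max of an empty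
-- sequence): the empty maya_set, and inputs where every candidate between the adjusted
-- minimum and -1 already lies in the adjusted set (B raises there too).
def Pre_partition_from_maya (maya_set : List Int) (charge : Int) : Prop :=
  maya_set ≠ [] ∧ ∃ x ∈ maya_set, (∀ y ∈ maya_set, x ≤ y) ∧
    ((PySem.Set.ofList (maya_set.map (fun y => y - charge))).filter
        (fun z => decide (x - charge ≤ z ∧ z ≤ -1))).length < (-(x - charge)).toNat
instance (maya_set : List Int) (charge : Int) : Decidable (Pre_partition_from_maya maya_set charge) := by unfold Pre_partition_from_maya; infer_instance

def pvWitness_partition_from_maya : List Int × Int := ([1, -2], 0)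

def Spec_partition_from_maya (maya_set : List Int) (charge : Int) (out : List Int) : Prop := out = partition_from_maya_alt maya_set charge
instance (maya_set : List Int) (charge : Int) (out : List Int) : Decidable (Spec_partition_from_maya maya_set charge out) := by unfold Spec_partition_from_maya; infer_instance

-- ===== CLAIM (what is proved, stated in full; the proofs are below) =====
def Claim_equal_partition_from_maya : Prop := ∀ (maya_set : List Int) (charge : Int), Dom_partition_from_maya maya_set charge → Pre_partition_from_maya maya_set charge → Spec_partition_from_maya maya_set charge (partition_from_maya maya_set charge)

-- ===== LEMMAS AND PROOFS =====

-- A's prefix phases (takeWhile, then append s_plus[i]+i) fused = B's single loop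
theorem pvBPlus_eq (l : List Int) : ∀ k : Nat,
    ((l.takeWhile (fun x => x != 0)).zipIdx k).map (fun p => p.1 + (p.2 : Int))
      = pvBPlus l k := by
  induction l with
  | nil => intro k; rfl
  | cons x t ih =>
    intro k
    by_cases hx : x = 0
    · simp [hx, pvBPlus, List.takeWhile]
    · simp only [List.takeWhile_cons, bne_iff_ne, ne_eq, hx, not_false_eq_true, if_pos,
        List.zipIdx_cons, List.map_cons, pvBPlus, ih (k + 1)]
      push_cast
      ring_nf

-- A's gap phases (filter, negate, subtract index) fused = B's single counting fold
theorem pvAdjLoop_eq (maya present : List Int)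
    (hp : ∀ i : Int, i ∈ present ↔ i ∈ maya) (l : List Int) : ∀ (k : Nat) (acc : List Int),
    l.foldl (fun (st : Int × List Int) i => if i ∈ present then st else (st.1 + 1, (-i - st.1) :: st.2))
        ((k : Int), acc)
      = ((k : Int) + (l.countP (fun i => decide (i ∉ maya)) : Int),
         ((((l.filter (fun i => decide (i ∉ maya))).map (fun num => -1 * num)).zipIdx k).map
            (fun p => p.1 - (p.2 : Int))).reverse ++ acc) := by
  induction l with
  | nil => intro k acc; simp
  | cons i t ih =>
    intro k acc
    by_cases hi : i ∈ maya
    · simp only [List.foldl_cons, if_pos ((hp i).mpr hi), List.filter_cons, List.countP_cons,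
        hi, not_true_eq_false, decide_false, ih k acc]
      simp
    · have hstep : ((k : Int) + 1) = (((k + 1 : Nat)) : Int) := by push_cast; ring
      simp only [List.foldl_cons, if_neg (fun h => hi ((hp i).mp h)), hstep, ih (k + 1) ((-i - (k:Int)) :: acc)]
      simp only [List.filter_cons, hi, not_false_eq_true, decide_true, if_pos, List.map_cons,
        List.zipIdx_cons, List.countP_cons, List.reverse_cons, List.append_assoc, Prod.mk.injEq]
      refine ⟨by push_cast; ring, ?_⟩
      rw [show (-1 * i - (k:Int)) = -i - (k:Int) by ring]
      simp

-- counting fact: #{x ≥ i} = #{x > i} + #{x = i}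
theorem pvCountGe_step (xs : List Int) (i : Int) :
    ((xs.countP (fun x => decide (i ≤ x)) : Int))
      = (xs.countP (fun x => decide (i < x)) : Int) + xs.count i := by
  induction xs with
  | nil => simp
  | cons y t ih =>
    simp only [List.countP_cons, List.count_cons]
    by_cases h1 : i ≤ y <;> by_cases h2 : i < y <;>
      simp [h1, h2, show (y = i ↔ i = y) from eq_comm] <;> omega

theorem pvLtShift (i : Int) : (fun x : Int => decide (i + 1 ≤ x)) = (fun x : Int => decide (i < x)) := by
  funext x; rw [decide_eq_decide]; omega

-- B's descending suffix-count loop computes A's per-value counts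
theorem pvTailLoop (sma : List Int) : ∀ (n : Nat) (acc : List Int),
    (PySem.List.pyRange (n : Int) 0 (-1)).foldl
        (fun st i =>
          (st.1 + (sma.foldl (fun d v => d.insert v (d.getD v 0 + 1)) (PySem.Dict.empty : PySem.Dict Int Int)).getD i 0,
           st.2 ++ [st.1 + (sma.foldl (fun d v => d.insert v (d.getD v 0 + 1)) (PySem.Dict.empty : PySem.Dict Int Int)).getD i 0]))
        ((sma.countP (fun x => decide ((n : Int) + 1 ≤ x)) : Int), acc)
      = ((sma.countP (fun x => decide ((1:Int) ≤ x)) : Int),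
         acc ++ ((PySem.List.pyRange 1 ((n : Int) + 1) 1).map
            (fun i => (sma.countP (fun x => decide (i ≤ x)) : Int))).reverse) := by
  intro n
  induction n with
  | zero =>
    intro acc
    simp [PySem.List.pyRange_neg_one_eq_nil, PySem.List.pyRange_one_eq_nil]
  | succ m ih =>
    intro acc
    rw [PySem.List.pyRange_neg_one_cons (by push_cast; omega)]
    simp only [List.foldl_cons]
    push_cast
    have hfreq : (sma.foldl (fun d v => d.insert v (d.getD v 0 + 1)) (PySem.Dict.empty : PySem.Dict Int Int)).getD ((m : Int) + 1) 0 = (sma.count ((m : Int) + 1) : Int) := by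
      rw [PySem.Dict.foldl_insert_getD_add_one_eq_counter]
      exact PySem.Dict.getD_counter sma ((m : Int) + 1)
    have hc : (sma.countP (fun x => decide ((m : Int) + 1 + 1 ≤ x)) : Int) + (sma.count ((m : Int) + 1) : Int)
        = (sma.countP (fun x => decide ((m : Int) + 1 ≤ x)) : Int) := by
      rw [pvLtShift ((m : Int) + 1), pvCountGe_step sma ((m : Int) + 1)]
    rw [hfreq, hc, show (m : Int) + 1 - 1 = (m : Int) by ring,
        ih (acc ++ [(sma.countP (fun x => decide ((m : Int) + 1 ≤ x)) : Int)]),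
        show PySem.List.pyRange 1 (((m : Int) + 1) + 1) 1 = PySem.List.pyRange 1 ((m : Int) + 1) 1 ++ [(m : Int) + 1] from PySem.List.pyRange_one_succ_right (by omega)]
    simp only [List.map_append, List.map_cons, List.map_nil, List.reverse_append, List.reverse_cons,
      List.reverse_nil, List.append_assoc, List.nil_append, List.cons_append]

-- the two ports agree for a common adjusted list
theorem pvCore (adj : List Int) :
    (let s_plus := adj.takeWhile (fun x => x != 0)
     let partition := (s_plus.zipIdx.map (fun p : Int × Nat => p.1 + (p.2 : Int)))
     match PySem.List.min? adj (fun x => x) with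
     | none => partition
     | some mn =>
       let s_minus := (PySem.List.pyRange (-1) (mn - 1) (-1)).filter (fun i => decide (i ∉ adj))
       let s_minus_adjust := s_minus.map (fun num => -1 * num)
       let s_minus_adjust2 := s_minus_adjust.zipIdx.map (fun p : Int × Nat => p.1 - (p.2 : Int))
       match PySem.List.max? s_minus_adjust2 (fun x => x) with
       | none => partition
       | some mx =>
         partition ++ (PySem.List.pyRange 1 (mx + 1) 1).map
           (fun i => s_minus_adjust2.foldl (fun acc num => if i ≤ num then acc + 1 else acc) (0 : Int)))
    =
    (let partition := pvBPlus adj 0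
     let present := PySem.Set.ofList adj
     match PySem.List.min? adj (fun x => x) with
     | none => partition
     | some m =>
       let gaps := (PySem.List.pyRange (-1) (m - 1) (-1)).foldl
         (fun (st : Int × List Int) i => if i ∈ present then st else (st.1 + 1, (-i - st.1) :: st.2))
         ((0 : Int), ([] : List Int))
       let sma := gaps.2.reverse
       match PySem.List.max? sma (fun x => x) with
       | none => partition
       | some mx =>
         let freq := sma.foldl (fun d v => d.insert v (d.getD v 0 + 1)) (PySem.Dict.empty : PySem.Dict Int Int)
         let st := (PySem.List.pyRange mx 0 (-1)).foldl
           (fun (st : Int × List Int) i => let c := st.1 + freq.getD i 0; (c, st.2 ++ [c])) ((0:Int), ([] : List Int))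
         partition ++ st.2.reverse) := by
  have hplus := pvBPlus_eq adj 0
  simp only [Nat.cast_zero] at hplus
  cases hmin : PySem.List.min? adj (fun x => x) with
  | none => simpa [hmin] using hplus
  | some m =>
    simp only [hmin]
    have hadj := pvAdjLoop_eq adj (PySem.Set.ofList adj) (fun i => PySem.Set.mem_ofList adj i)
          (PySem.List.pyRange (-1) (m - 1) (-1)) 0 []
    simp only [Nat.cast_zero] at hadj
    rw [hadj]
    simp only [List.append_nil, List.reverse_reverse]
    set sma := (((PySem.List.pyRange (-1) (m - 1) (-1)).filter (fun i => decide (i ∉ adj))).map (fun num => -1 * num)).zipIdx.map (fun p : Int × Nat => p.1 - (p.2 : Int)) with hsma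
    cases hmax : PySem.List.max? sma (fun x => x) with
    | none => simpa [hmax] using hplus
    | some mx =>
      simp only [hmax, hplus]
      have hmaxle := PySem.List.max?_isMax hmax
      by_cases hneg : mx < 0
      · rw [PySem.List.pyRange_neg_one_eq_nil (by omega), PySem.List.pyRange_one_eq_nil (by omega)]
        simp
      · have h0 : 0 = (sma.countP (fun x => decide (mx + 1 ≤ x)) : Int) := by
          rw [List.countP_eq_zero.mpr]
          · rfl
          · intro x hx
            have := hmaxle x hx
            simp only [decide_eq_true_eq] at *
            omega
        have := pvTailLoop sma mx.toNat (acc := [])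
        rw [show ((mx.toNat : Int)) = mx from by omega] at this
        rw [← h0] at this
        rw [this]
        simp only [List.nil_append, List.reverse_reverse]
        congr 1
        apply List.map_congr_left
        intro i _
        rw [show (fun acc num => if i ≤ num then acc + 1 else acc) = (fun (acc : Int) (num : Int) => if (fun x => i ≤ x) num then acc + 1 else acc) from rfl,
            PySem.List.foldl_ite_add_one (fun x => i ≤ x) sma 0]
        simp

-- ===== VERDICT (by name: the statement is the Claim_ definition above) =====
theorem partition_from_maya_spec : Claim_equal_partition_from_maya := by
  intro maya_set charge _hdom _hpre
  unfold Spec_partition_from_maya partition_from_maya partition_from_maya_alt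
  by_cases hc : charge = 0
  · simp only [hc, ne_eq, not_true_eq_false, ite_false]
    have hmap : maya_set.map (fun x => x - (0:Int)) = maya_set := by simp
    rw [hmap]
    exact pvCore maya_set
  · simp only [ne_eq, hc, not_false_eq_true, if_pos]
    exact pvCore (maya_set.map (fun x => x - charge))
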